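-- pv_equiv track=rewrite | github.com/blackoutjack/jamweave | util/util.py | get_info_path
-- ===== SOURCE A (Python) =====
-- def get_info_path(errp):
--   # %%% Ugly string searching.
--   lines = errp.split('\n')
--   infopath = None
--   infosearch = ' Analysis information: '
--   for line in lines:
--     # Parse the application name.
--     pos = line.find(infosearch)
--     if pos > -1:
--       endpos = pos + len(infosearch)
--       infopath = line[endpos:].strip()
--       break
--   return infopath
-- ===== SOURCE B (Python) =====
-- def get_info_path(errp):
--   marker = ' Analysis information: '
--   pos = errp.find(marker)
--   if pos == -1:
--     return None
--   endpos = pos + len(marker)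
--   nl = errp.find('\n', endpos)
--   end = len(errp) if nl == -1 else nl
--   return errp[endpos:end].strip()
-- ===== Notes on version B (the rewrite author's own statement) =====
-- stated objective: simpler
-- what changed: Replaces the split-into-lines loop by a single find of the marker on the whole string followed by a slice up to the next newline and a strip.
import Mathlib
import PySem

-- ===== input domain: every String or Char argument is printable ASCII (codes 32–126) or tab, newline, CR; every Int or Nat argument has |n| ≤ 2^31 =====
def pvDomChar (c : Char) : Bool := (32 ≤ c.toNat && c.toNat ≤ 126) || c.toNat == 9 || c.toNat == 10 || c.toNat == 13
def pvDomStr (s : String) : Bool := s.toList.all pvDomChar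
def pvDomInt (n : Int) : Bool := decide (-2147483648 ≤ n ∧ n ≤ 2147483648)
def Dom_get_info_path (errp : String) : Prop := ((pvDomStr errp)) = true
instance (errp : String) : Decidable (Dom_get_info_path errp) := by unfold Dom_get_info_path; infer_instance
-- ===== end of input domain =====

-- B replaces A's split-into-lines scan by a single find of the marker on the whole
-- string, a slice up to the next newline, and a strip (objective: simpler).

-- ===== PORT A =====
-- A's for-loop with break: the first line containing the marker wins.
def gipLoop (infosearch : String) : List String → Option String
  | [] => none
  | line :: rest =>
    let pos := PySem.Str.find line infosearch
    if pos > -1 then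
      some (PySem.Str.strip (PySem.Str.slice line (some (pos + PySem.Str.len infosearch)) none))
    else gipLoop infosearch rest

def get_info_path (errp : String) : Option String :=
  let infosearch := " Analysis information: "
  -- errp.split('\n'): the separator is the non-empty literal "\n", so split? is `some`; getD is never the fallback
  gipLoop infosearch ((PySem.Str.split? errp "\n").getD [])

-- ===== PORT B =====
def get_info_path_alt (errp : String) : Option String :=
  let marker := " Analysis information: "
  let pos := PySem.Str.find errp marker
  if pos = -1 then none
  else
    let endpos := pos + PySem.Str.len marker
    let nl := PySem.Str.findFrom errp "\n" endpos none
    let e := if nl = -1 then PySem.Str.len errp else nl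
    some (PySem.Str.strip (PySem.Str.slice errp (some endpos) (some e)))

-- ===== PRECONDITION & SPEC =====
def Spec_get_info_path (errp : String) (out : Option String) : Prop := out = get_info_path_alt errp
instance (errp : String) (out : Option String) : Decidable (Spec_get_info_path errp out) := by unfold Spec_get_info_path; infer_instance

-- ===== CLAIM (what is proved, stated in full; the proofs are below) =====
def Claim_equal_get_info_path : Prop := ∀ (errp : String), Dom_get_info_path errp → Spec_get_info_path errp (get_info_path errp)

-- ===== LEMMAS AND PROOFS =====

theorem go_zero (sep l cur : List Char) (acc : List (List Char)) :
    PySem.Chars.splitOn.go sep 0 l cur acc = ((cur.reverse ++ l) :: acc).reverse := rfl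
theorem go_nil (sep cur : List Char) (acc : List (List Char)) (fuel : Nat) :
    PySem.Chars.splitOn.go sep (fuel+1) [] cur acc = (cur.reverse :: acc).reverse := rfl
theorem go_cons (sep cur rest : List Char) (c : Char) (acc : List (List Char)) (fuel : Nat) :
    PySem.Chars.splitOn.go sep (fuel+1) (c :: rest) cur acc =
      if sep.isPrefixOf (c :: rest) then PySem.Chars.splitOn.go sep fuel (List.drop sep.length (c::rest)) [] (cur.reverse :: acc)
      else PySem.Chars.splitOn.go sep fuel rest (c :: cur) acc := rfl

theorem goNoSep (c : Char) (l : List Char) : ∀ (fuel : Nat) (cur : List Char) (acc : List (List Char)),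
    c ∉ l → l.length ≤ fuel →
    PySem.Chars.splitOn.go [c] fuel l cur acc = ((cur.reverse ++ l) :: acc).reverse := by
  induction l with
  | nil =>
    intro fuel cur acc _ _
    cases fuel with
    | zero => simp [go_zero]
    | succ f => simp [go_nil]
  | cons x xs ih =>
    intro fuel cur acc hc hf
    cases fuel with
    | zero => simp at hf
    | succ f =>
      rw [go_cons]
      have hx : x ≠ c := fun h => hc (by simp [h])
      have : List.isPrefixOf [c] (x :: xs) = false := by
        simp [List.isPrefixOf]; intro h; exact absurd h.symm hx
      rw [this, if_neg (by simp)]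
      rw [ih f (x :: cur) acc (fun h => hc (by simp [h])) (by simpa using Nat.le_of_succ_le_succ hf)]
      simp

theorem goThrough (c : Char) (t : List Char) (L : List Char) : ∀ (fuel : Nat) (cur : List Char) (acc : List (List Char)),
    c ∉ L →
    PySem.Chars.splitOn.go [c] (L.length + fuel + 1) (L ++ c :: t) cur acc =
      PySem.Chars.splitOn.go [c] fuel t [] ((cur.reverse ++ L) :: acc) := by
  induction L with
  | nil =>
    intro fuel cur acc _
    simp only [List.length_nil, Nat.zero_add, List.nil_append]
    rw [go_cons]
    have : List.isPrefixOf [c] (c :: t) = true := by simp [List.isPrefixOf]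
    rw [this]
    simp
  | cons x L' ih =>
    intro fuel cur acc hc
    have hx : x ≠ c := fun h => hc (by simp [h])
    have harith : (x :: L').length + fuel + 1 = (L'.length + fuel + 1) + 1 := by simp; omega
    rw [harith, List.cons_append, go_cons]
    have hpf : List.isPrefixOf [c] (x :: (L' ++ c :: t)) = false := by
      simp [List.isPrefixOf]; intro h; exact absurd h.symm hx
    rw [hpf]
    simp only [if_neg (by simp : ¬ (false = true))]
    rw [ih fuel (x :: cur) acc (fun h => hc (by simp [h]))]
    simp

theorem goAcc (c : Char) : ∀ (fuel : Nat) (l cur : List Char) (acc : List (List Char)),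
    PySem.Chars.splitOn.go [c] fuel l cur acc = acc.reverse ++ PySem.Chars.splitOn.go [c] fuel l cur [] := by
  intro fuel
  induction fuel with
  | zero => intro l cur acc; simp [go_zero]
  | succ f ih =>
    intro l cur acc
    cases l with
    | nil => simp [go_nil]
    | cons x rest =>
      rw [go_cons, go_cons]
      by_cases h : List.isPrefixOf [c] (x :: rest) = true
      · rw [if_pos h, if_pos h, ih _ [] (cur.reverse :: acc), ih _ [] ([cur.reverse])]
        simp
      · rw [if_neg h, if_neg h, ih _ (x :: cur) acc]

theorem splitOn_no (c : Char) (s : List Char) (hc : c ∉ s) :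
    PySem.Chars.splitOn s [c] = [s] := by
  show PySem.Chars.splitOn.go [c] (s.length+1) s [] [] = [s]
  rw [goNoSep c s (s.length+1) [] [] hc (by omega)]
  simp

theorem splitOn_cons (c : Char) (L t : List Char) (hc : c ∉ L) :
    PySem.Chars.splitOn (L ++ c :: t) [c] = L :: PySem.Chars.splitOn t [c] := by
  show PySem.Chars.splitOn.go [c] ((L ++ c :: t).length+1) (L ++ c :: t) [] [] = _
  have harith : (L ++ c :: t).length + 1 = L.length + (t.length + 1) + 1 := by simp [Nat.add_assoc]
  rw [harith, goThrough c t L (t.length+1) [] [] hc]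
  rw [goAcc]
  simp [PySem.Chars.splitOn]

-- sub occurs as a prefix of a drop → sub is an infix
theorem infix_of_prefix_drop (sub s : List Char) (j : Nat) (h : sub <+: s.drop j) : sub <:+: s :=
  (PySem.Chars.isIn_iff_infix sub s).mp ((PySem.Chars.exists_prefix_drop_iff_isIn sub s).mp ⟨j, h⟩)

-- find is the unique minimal prefix-drop position
theorem findUnique (s sub : List Char) (p : Nat) (hp : sub <+: s.drop p)
    (hmin : ∀ i < p, ¬ sub <+: s.drop i) : PySem.Chars.find s sub = (p : Int) := by
  have hinf : sub <:+: s := infix_of_prefix_drop sub s p hp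
  have hnn : 0 ≤ PySem.Chars.find s sub := (PySem.Chars.find_nonneg_iff s sub).mpr hinf
  obtain ⟨hq, hqmin⟩ := PySem.Chars.find_spec (s := s) (sub := sub) hnn
  rcases Nat.lt_trichotomy (PySem.Chars.find s sub).toNat p with h | h | h
  · exact absurd hq (hmin _ h)
  · omega
  · exact absurd hp (hqmin _ h)

-- an occurrence at i ≤ |L| of a c-free pattern lies inside L
theorem noCross (c : Char) (sub L t : List Char) (hc : c ∉ sub)
    (i : Nat) (hi : i ≤ L.length) (h : sub <+: (L ++ c :: t).drop i) :
    i + sub.length ≤ L.length ∧ sub <+: L.drop i := by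
  have hdrop : (L ++ c :: t).drop i = L.drop i ++ c :: t := List.drop_append_of_le_length hi
  rw [hdrop] at h
  by_cases hlen : sub.length ≤ (L.drop i).length
  · refine ⟨by simp at hlen ⊢; omega, (List.isPrefix_append_of_length hlen).mp h⟩
  · exfalso
    have hk : (L.drop i).length < sub.length := by omega
    have hkdef : (L.drop i).length = L.length - i := by simp
    set k := (L.drop i).length with hkd
    have hsubk : sub[k] = (L.drop i ++ c :: t)[k]'(by simp; omega) := List.IsPrefix.getElem h hk
    have hck : (L.drop i ++ c :: t)[k]'(by simp; omega) = c := by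
      rw [List.getElem_append_right (by omega)]
      simp [hkd]
    exact hc (by rw [← hck, ← hsubk]; exact List.getElem_mem hk)

-- find of a single character after a c-free block
theorem findSingleton (c : Char) (u v : List Char) (hc : c ∉ u) :
    PySem.Chars.find (u ++ c :: v) [c] = (u.length : Int) := by
  apply findUnique
  · rw [List.drop_append_of_le_length (Nat.le_refl _)]
    simp
  · intro i hiu hpre
    have h0 : (0:Nat) < [c].length := by simp
    have hget : [c][0] = ((u ++ c :: v).drop i)[0]'(by simp; omega) := List.IsPrefix.getElem hpre h0
    have hui : (u ++ c :: v)[i]'(by simp; omega) = u[i]'(by omega) := List.getElem_append_left (by omega)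
    have hcu : c = u[i]'(by omega) := by
      rw [show ([c][0] = c) from rfl] at hget
      rw [hget, List.getElem_drop]
      simpa using hui
    exact hc (by rw [hcu]; exact List.getElem_mem (by omega))

theorem infixAppend (c : Char) (sub L t : List Char) (hc : c ∉ sub) :
    sub <:+: (L ++ c :: t) ↔ sub <:+: L ∨ sub <:+: t := by
  constructor
  · intro h
    obtain ⟨j, hj⟩ := (PySem.Chars.exists_prefix_drop_iff_isIn sub (L ++ c :: t)).mpr
      ((PySem.Chars.isIn_iff_infix sub (L ++ c :: t)).mpr h)
    by_cases hjL : j ≤ L.length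
    · exact Or.inl (infix_of_prefix_drop sub L j (noCross c sub L t hc j hjL hj).2)
    · right
      have hj' : sub <+: t.drop (j - L.length - 1) := by
        have hjeq : j = L.length + (j - L.length - 1) + 1 := by omega
        have : (L ++ c :: t).drop j = t.drop (j - L.length - 1) := by
          rw [hjeq, show L.length + (j - L.length - 1) + 1 = L.length + ((j - L.length - 1) + 1) from by omega,
            List.drop_append]
          simp
        rwa [this] at hj
      exact infix_of_prefix_drop sub t _ hj'
  · rintro (h | h)
    · exact h.trans (List.prefix_append L (c :: t)).isInfix
    · exact h.trans ((List.suffix_cons c t).trans (List.suffix_append L (c :: t))).isInfix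

theorem findLeft (c : Char) (sub L t : List Char) (hne : sub ≠ []) (hc : c ∉ sub)
    (hm : sub <:+: L) : PySem.Chars.find (L ++ c :: t) sub = PySem.Chars.find L sub := by
  have hnn : 0 ≤ PySem.Chars.find L sub := (PySem.Chars.find_nonneg_iff L sub).mpr hm
  obtain ⟨hp, hpmin⟩ := PySem.Chars.find_spec (s := L) (sub := sub) hnn
  set p := (PySem.Chars.find L sub).toNat with hpdef
  have hsl : 0 < sub.length := by cases sub with | nil => exact absurd rfl hne | cons a l => simp
  have hpL : p < L.length := by
    have := hp.length_le
    simp at this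
    omega
  have : PySem.Chars.find (L ++ c :: t) sub = (p : Int) := by
    apply findUnique
    · rw [List.drop_append_of_le_length (by omega)]
      exact hp.trans (List.prefix_append _ _)
    · intro i hip hpre
      exact hpmin i hip (noCross c sub L t hc i (by omega) hpre).2
  rw [this, hpdef, Int.toNat_of_nonneg hnn]

theorem findRight (c : Char) (sub L t : List Char) (hc : c ∉ sub)
    (hmL : ¬ sub <:+: L) (hmt : sub <:+: t) :
    PySem.Chars.find (L ++ c :: t) sub = (L.length : Int) + 1 + PySem.Chars.find t sub := by
  have hnn : 0 ≤ PySem.Chars.find t sub := (PySem.Chars.find_nonneg_iff t sub).mpr hmt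
  obtain ⟨hp, hpmin⟩ := PySem.Chars.find_spec (s := t) (sub := sub) hnn
  set p := (PySem.Chars.find t sub).toNat with hpdef
  have : PySem.Chars.find (L ++ c :: t) sub = ((L.length + 1 + p : Nat) : Int) := by
    apply findUnique
    · have : (L ++ c :: t).drop (L.length + 1 + p) = t.drop p := by
        rw [show L.length + 1 + p = L.length + (p + 1) from by omega, List.drop_append]
        simp
      rw [this]
      exact hp
    · intro i hi hpre
      by_cases hiL : i ≤ L.length
      · exact hmL (infix_of_prefix_drop sub L i (noCross c sub L t hc i hiL hpre).2)
      · have hk : i - L.length - 1 < p := by omega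
        have : (L ++ c :: t).drop i = t.drop (i - L.length - 1) := by
          rw [show i = L.length + ((i - L.length - 1) + 1) from by omega, List.drop_append]
          simp
        rw [this] at hpre
        exact hpmin _ hk hpre
  rw [this, hpdef]
  push_cast [Int.toNat_of_nonneg hnn]
  ring

theorem findNone (c : Char) (u : List Char) (hc : c ∉ u) : PySem.Chars.find u [c] = -1 := by
  rw [PySem.Chars.find_eq_neg_one_iff]
  intro h
  exact hc ((List.singleton_infix_iff c u).mp h)
def mkC : List Char := (" Analysis information: ").toList
def gipLoopC : List (List Char) → Option (List Char)
  | [] => none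
  | line :: rest =>
    let pos := PySem.Chars.find line mkC
    if pos > -1 then
      some (PySem.Chars.strip (PySem.Chars.slice line (some (pos + (mkC.length : Int))) none))
    else gipLoopC rest
def gipAC (s : List Char) : Option (List Char) := gipLoopC (PySem.Chars.splitOn s ['\n'])
def gipBC (s : List Char) : Option (List Char) :=
  let pos := PySem.Chars.find s mkC
  if pos = -1 then none
  else
    let endpos := pos + (mkC.length : Int)
    let nl := PySem.Chars.findFrom s ['\n'] endpos none
    let e := if nl = -1 then (s.length : Int) else nl
    some (PySem.Chars.strip (PySem.Chars.slice s (some endpos) (some e)))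

theorem nlToList : ("\n").toList = ['\n'] := rfl
theorem mkToList : (" Analysis information: ").toList = mkC := rfl

theorem bridgeB (errp : String) : (get_info_path_alt errp).map String.toList = gipBC errp.toList := by
  simp only [get_info_path_alt, gipBC, PySem.Str.find_eq, PySem.Str.len_eq, PySem.Str.findFrom_eq,
    nlToList, mkToList]
  split_ifs with h
  · rfl
  · simp [PySem.Str.toList_strip, PySem.Str.toList_slice]
  · simp [PySem.Str.toList_strip, PySem.Str.toList_slice]

theorem loopBridge (lines : List String) :
    (gipLoop " Analysis information: " lines).map String.toList = gipLoopC (lines.map String.toList) := by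
  induction lines with
  | nil => rfl
  | cons line rest ih =>
    simp only [gipLoop, gipLoopC, PySem.Str.find_eq, PySem.Str.len_eq, mkToList, List.map_cons]
    split_ifs with h
    · simp [PySem.Str.toList_strip, PySem.Str.toList_slice]
    · exact ih

theorem bridgeA (errp : String) : (get_info_path errp).map String.toList = gipAC errp.toList := by
  have h1 : Option.map (fun x => List.map String.toList x) (PySem.Str.split? errp "\n")
      = some (PySem.Chars.splitOn errp.toList ['\n']) := by
    rw [PySem.Str.split?_map]
    simp [PySem.Chars.split?, nlToList]
  cases hsp : PySem.Str.split? errp "\n" with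
  | none => rw [hsp] at h1; simp at h1
  | some ls =>
    rw [hsp] at h1
    simp only [Option.map_some] at h1
    have h2 : List.map String.toList ls = PySem.Chars.splitOn errp.toList ['\n'] := by
      simpa using h1
    simp only [get_info_path, gipAC, hsp, Option.getD_some]
    rw [loopBridge, h2]

-- marker facts
theorem mkC_ne : mkC ≠ [] := by decide
theorem mkC_nonl : '\n' ∉ mkC := by decide

-- occurrence fits: find position + marker length stays within the string
theorem occ_le (s : List Char) (hnn : 0 ≤ PySem.Chars.find s mkC) :
    (PySem.Chars.find s mkC).toNat + mkC.length ≤ s.length := by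
  obtain ⟨hp, _⟩ := PySem.Chars.find_spec (s := s) (sub := mkC) hnn
  have h1 := hp.length_le
  have h2 : (0:Nat) < mkC.length := by decide
  simp at h1
  omega

theorem noNL_case (s : List Char) (hc : '\n' ∉ s) : gipAC s = gipBC s := by
  by_cases hf : PySem.Chars.find s mkC = -1
  · rw [gipAC, splitOn_no '\n' s hc]
    simp only [gipLoopC, gipBC, hf]
    norm_num
  · have hnn : 0 ≤ PySem.Chars.find s mkC := by
      have := PySem.Chars.neg_one_le_find s mkC; omega
    set p := (PySem.Chars.find s mkC).toNat with hpdef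
    have hK : (p + mkC.length) ≤ s.length := occ_le s hnn
    have hcast : PySem.Chars.find s mkC + (mkC.length : Int) = ((p + mkC.length : Nat) : Int) := by
      omega
    have hffrom : PySem.Chars.findFrom s ['\n'] ((p + mkC.length : Nat) : Int) none = -1 := by
      rw [PySem.Chars.findFrom_natCast s ['\n'] (p + mkC.length) hK]
      rw [findNone '\n' _ (fun h => hc (List.mem_of_mem_drop h))]
      simp
    rw [gipAC, splitOn_no '\n' s hc]
    simp only [gipLoopC, gipBC, hf, hcast, hffrom]
    rw [if_pos (show PySem.Chars.find s mkC > -1 from by omega)]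
    simp only [if_false, if_true]
    congr 1
    simp only [PySem.Chars.slice_eq_listSlice]
    rw [PySem.List.slice_from_natCast, PySem.List.slice_natCast]
    congr 1
    exact (List.take_of_length_le (by simp)).symm

theorem stepEq (L t : List Char) (hL : '\n' ∉ L) (hm : mkC <:+: L) :
    gipAC (L ++ '\n' :: t) = gipBC (L ++ '\n' :: t) := by
  have hnn : 0 ≤ PySem.Chars.find L mkC := (PySem.Chars.find_nonneg_iff L mkC).mpr hm
  set fL := PySem.Chars.find L mkC with hfdef
  set K := fL.toNat + mkC.length with hKdef
  have hKL : K ≤ L.length := occ_le L hnn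
  have hfind : PySem.Chars.find (L ++ '\n' :: t) mkC = fL :=
    findLeft '\n' mkC L t mkC_ne mkC_nonl hm
  have hcast : fL + (mkC.length : Int) = ((K : Nat) : Int) := by
    omega
  have hdropK : (L ++ '\n' :: t).drop K = L.drop K ++ '\n' :: t :=
    List.drop_append_of_le_length hKL
  have hnlK : '\n' ∉ L.drop K := fun h => hL (List.mem_of_mem_drop h)
  have hffrom : PySem.Chars.findFrom (L ++ '\n' :: t) ['\n'] ((K : Nat) : Int) none
      = ((L.length : Nat) : Int) := by
    rw [PySem.Chars.findFrom_natCast _ ['\n'] K (by simp; omega)]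
    rw [hdropK, findSingleton '\n' _ t hnlK]
    rw [if_neg (by omega)]
    push_cast [List.length_drop]
    omega
  rw [gipAC, splitOn_cons '\n' L t hL]
  simp only [gipLoopC, gipBC, hfind, ← hfdef, hcast, hffrom]
  rw [if_pos (by omega : fL > -1), if_neg (by omega : ¬ fL = -1)]
  rw [if_neg (by omega : ¬ ((L.length : Nat) : Int) = -1)]
  congr 1
  simp only [PySem.Chars.slice_eq_listSlice]
  rw [PySem.List.slice_from_natCast, PySem.List.slice_natCast, hdropK]
  rw [show L.length - K = (L.drop K).length from by simp]
  rw [List.take_left]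

theorem stepA (L t : List Char) (hL : '\n' ∉ L) (hm : ¬ mkC <:+: L) :
    gipAC (L ++ '\n' :: t) = gipAC t := by
  rw [gipAC, splitOn_cons '\n' L t hL]
  simp only [gipLoopC]
  have hfl : PySem.Chars.find L mkC = -1 := (PySem.Chars.find_eq_neg_one_iff L mkC).mpr hm
  rw [if_neg (by rw [hfl]; omega)]
  rfl

theorem stepB (L t : List Char) (hm : ¬ mkC <:+: L) :
    gipBC (L ++ '\n' :: t) = gipBC t := by
  by_cases hmt : mkC <:+: t
  · have hftnn : 0 ≤ PySem.Chars.find t mkC := (PySem.Chars.find_nonneg_iff t mkC).mpr hmt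
    set pt := (PySem.Chars.find t mkC).toNat with hptdef
    set Kt := pt + mkC.length with hKtdef
    set Ks := L.length + 1 + Kt with hKsdef
    have hKt : Kt ≤ t.length := occ_le t hftnn
    have hfind : PySem.Chars.find (L ++ '\n' :: t) mkC
        = (L.length : Int) + 1 + PySem.Chars.find t mkC :=
      findRight '\n' mkC L t mkC_nonl hm hmt
    have hcast_s : (L.length : Int) + 1 + PySem.Chars.find t mkC + (mkC.length : Int)
        = ((Ks : Nat) : Int) := by
      omega
    have hcast_t : PySem.Chars.find t mkC + (mkC.length : Int) = ((Kt : Nat) : Int) := by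
      omega
    have hdropEq : (L ++ '\n' :: t).drop Ks = t.drop Kt := by
      rw [hKsdef, show L.length + 1 + Kt = L.length + (Kt + 1) from by omega, List.drop_append]
      simp
    have hfs : PySem.Chars.findFrom (L ++ '\n' :: t) ['\n'] ((Ks : Nat) : Int) none
        = if PySem.Chars.find (t.drop Kt) ['\n'] = -1 then -1
          else ((Ks : Nat) : Int) + PySem.Chars.find (t.drop Kt) ['\n'] := by
      rw [PySem.Chars.findFrom_natCast _ ['\n'] Ks (by simp; omega), hdropEq]
    have hft : PySem.Chars.findFrom t ['\n'] ((Kt : Nat) : Int) none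
        = if PySem.Chars.find (t.drop Kt) ['\n'] = -1 then -1
          else ((Kt : Nat) : Int) + PySem.Chars.find (t.drop Kt) ['\n'] := by
      rw [PySem.Chars.findFrom_natCast _ ['\n'] Kt hKt]
    have hgnn : -1 ≤ PySem.Chars.find (t.drop Kt) ['\n'] := PySem.Chars.neg_one_le_find _ _
    simp only [gipBC, hfind, hcast_s, hcast_t, hfs, hft,
      eq_false (show ¬((L.length : Int) + 1 + PySem.Chars.find t mkC = -1) from by omega),
      eq_false (show ¬(PySem.Chars.find t mkC = -1) from by omega), if_false]
    by_cases hg : PySem.Chars.find (t.drop Kt) ['\n'] = -1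
    · simp only [hg, reduceIte]
      congr 1
      simp only [PySem.Chars.slice_eq_listSlice]
      rw [show ((L ++ '\n' :: t).length : Int) = (((L ++ '\n' :: t).length : Nat) : Int) from rfl]
      rw [PySem.List.slice_natCast, PySem.List.slice_natCast, hdropEq]
      rw [show (L ++ '\n' :: t).length - Ks = t.length - Kt from by simp; omega]
    · set g := PySem.Chars.find (t.drop Kt) ['\n'] with hgdef
      simp only [eq_false hg, if_false,
        eq_false (show ¬((Ks : Int) + g = -1) from by omega),
        eq_false (show ¬((Kt : Int) + g = -1) from by omega)]
      have hgcast : (Ks : Int) + g = ((Ks + g.toNat : Nat) : Int) := by omega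
      have hgcast' : (Kt : Int) + g = ((Kt + g.toNat : Nat) : Int) := by omega
      rw [hgcast, hgcast']
      congr 1
      simp only [PySem.Chars.slice_eq_listSlice]
      rw [PySem.List.slice_natCast, PySem.List.slice_natCast, hdropEq]
      simp
  · have hns : ¬ mkC <:+: (L ++ '\n' :: t) := by
      rw [infixAppend '\n' mkC L t mkC_nonl]
      rintro (h | h)
      · exact hm h
      · exact hmt h
    simp only [gipBC, (PySem.Chars.find_eq_neg_one_iff _ _).mpr hns,
      (PySem.Chars.find_eq_neg_one_iff _ _).mpr hmt]
    simp

theorem charMainAux : ∀ (n : Nat) (s : List Char), s.length ≤ n → gipAC s = gipBC s := by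
  intro n
  induction n with
  | zero =>
    intro s hs
    have : s = [] := by cases s with | nil => rfl | cons a l => simp at hs
    subst this
    decide
  | succ n ih =>
    intro s hs
    by_cases hc : '\n' ∈ s
    · have hd : s.dropWhile (fun x => x != '\n') ≠ [] := by
        intro h
        rw [List.dropWhile_eq_nil_iff] at h
        simpa using h _ hc
      have hhead : (s.dropWhile (fun x => x != '\n')).head hd = '\n' := by
        have := List.head_dropWhile_not (fun x => x != '\n') hd
        simpa using this
      have hd2 : s.dropWhile (fun x => x != '\n')
          = '\n' :: (s.dropWhile (fun x => x != '\n')).tail := by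
        conv_lhs => rw [← List.cons_head_tail hd]
        rw [hhead]
      set L := s.takeWhile (fun x => x != '\n') with hLdef
      set t := (s.dropWhile (fun x => x != '\n')).tail with htdef
      have hseq : s = L ++ '\n' :: t := by
        conv_lhs => rw [← List.takeWhile_append_dropWhile (p := fun x => x != '\n') (l := s)]
        rw [← hd2]
      have hLn : '\n' ∉ L := by
        intro h
        simpa using List.mem_takeWhile_imp h
      have hlen : t.length ≤ n := by
        rw [hseq] at hs
        simp at hs
        omega
      rw [hseq]
      by_cases hm : mkC <:+: L
      · exact stepEq L t hLn hm
      · rw [stepA L t hLn hm, stepB L t hm]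
        exact ih t hlen
    · exact noNL_case s hc

theorem charMain (s : List Char) : gipAC s = gipBC s := charMainAux s.length s (Nat.le_refl _)

-- ===== VERDICT (by name: the statement is the Claim_ definition above) =====
theorem get_info_path_spec : Claim_equal_get_info_path := by
  intro errp _
  unfold Spec_get_info_path
  apply Option.map_injective (f := String.toList) (fun a b h => String.toList_inj.mp h)
  rw [bridgeA, bridgeB, charMain]
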